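-- pv_equiv track=rewrite | github.com/Ellariel/mango_hybit | mosaik_agents.py | get_aggregated_state
-- ===== SOURCE A (Python) =====
-- import copy
--
-- STATE_DICT = {
--     'production' : {
--         'min' : 0,
--         'max' : 0,
--         'current' : 0,
--     },
--     'consumption' : {
--         'min' : 0,
--         'max' : 0,
--         'current' : 0,
--     },
-- }
--
-- def get_aggregated_state(agents_info, current_state=None):
--     if current_state == None:
--         current_state = copy.deepcopy(STATE_DICT)
--     else:
--         current_state = copy.deepcopy(current_state)
--     for aid, state in agents_info.items():
--         for i in current_state.keys():
--             for j in current_state[i].keys():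
--                 current_state[i][j] += state[i][j]
--     return current_state
-- ===== SOURCE B (Python) =====
-- STATE_DICT = {
--     'production' : {
--         'min' : 0,
--         'max' : 0,
--         'current' : 0,
--     },
--     'consumption' : {
--         'min' : 0,
--         'max' : 0,
--         'current' : 0,
--     },
-- }
--
-- def get_aggregated_state(agents_info, current_state=None):
--     base = STATE_DICT if current_state == None else current_state
--     # Pass 1: flatten every agent's contributions into ONE flat dict keyed by (i, j),
--     # driven by the agents' own items (not by the base's keys).
--     totals = {}
--     for state in agents_info.values():
--         for i, inner in state.items():
--             for j, v in inner.items():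
--                 totals[(i, j)] = totals.get((i, j), 0) + v
--     # Pass 2: a single pass over the base structure, adding the precomputed total per leaf.
--     return {i: {j: v + totals.get((i, j), 0) for j, v in inner.items()}
--             for i, inner in base.items()}
-- ===== Notes on version B (the rewrite author's own statement) =====
-- stated objective: alternative
-- what changed: A mutates a deep copy of the base state in place, looking up state[i][j] for every base key per agent; B first flattens all agents' contributions into one flat dict keyed by (i,j) pairs (iterating over the agents' own items), then builds the result in a single pass over the base by dict lookup.
import Mathlib
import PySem

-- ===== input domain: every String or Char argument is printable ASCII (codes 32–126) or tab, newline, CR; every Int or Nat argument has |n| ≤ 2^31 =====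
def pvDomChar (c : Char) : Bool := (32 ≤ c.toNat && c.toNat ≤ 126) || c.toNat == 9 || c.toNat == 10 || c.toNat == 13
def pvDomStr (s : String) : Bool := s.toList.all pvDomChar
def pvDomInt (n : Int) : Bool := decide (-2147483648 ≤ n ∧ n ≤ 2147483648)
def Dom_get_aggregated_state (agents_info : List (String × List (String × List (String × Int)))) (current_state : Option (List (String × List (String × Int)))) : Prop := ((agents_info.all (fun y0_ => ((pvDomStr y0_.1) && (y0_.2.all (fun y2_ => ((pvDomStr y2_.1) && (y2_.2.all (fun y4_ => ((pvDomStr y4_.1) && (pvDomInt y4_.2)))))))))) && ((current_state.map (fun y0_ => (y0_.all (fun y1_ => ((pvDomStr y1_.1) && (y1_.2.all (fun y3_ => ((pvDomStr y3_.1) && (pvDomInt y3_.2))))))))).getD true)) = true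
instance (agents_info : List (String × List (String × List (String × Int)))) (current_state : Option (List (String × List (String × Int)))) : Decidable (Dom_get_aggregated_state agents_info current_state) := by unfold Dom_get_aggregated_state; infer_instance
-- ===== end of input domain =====

-- B replaces A's per-agent in-place mutation of a deep copy by a two-pass algorithm: it first
-- flattens all agents' contributions into one flat dict keyed by (i,j) pairs (iterating over the
-- agents' own items), then builds the result in a single pass over the base structure
-- (objective: alternative, same cost). Return-value equivalence only; neither program mutates
-- its arguments (A deep-copies first, B builds fresh dicts).

-- the module-level STATE_DICT constant, as an insertion-ordered association list
def STATE_DICT_L : List (String × List (String × Int)) :=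
  [("production", [("min", 0), ("max", 0), ("current", 0)]),
   ("consumption", [("min", 0), ("max", 0), ("current", 0)])]

-- d[k] with a default: first-match lookup in an association list. Exact for Python's d[k]
-- whenever k is present (Pre_ guarantees presence; Python raises KeyError otherwise).
def lookupD {α : Type} (d : List (String × α)) (k : String) (dflt : α) : α :=
  match d with
  | [] => dflt
  | p :: t => if p.1 = k then p.2 else lookupD t k dflt

-- d[k] = F(d[k]) on the first entry with key k (no-op if absent): Python's in-place update
-- of a dict entry (unique keys), preserving insertion order.
def updA {α : Type} (k : String) (F : α → α) : List (String × α) → List (String × α)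
  | [] => []
  | p :: t => if p.1 = k then (p.1, F p.2) :: t else p :: updA k F t

-- ===== PORT A =====
-- literal transliteration of A: deepcopy prologue, then for each agent, for each key i of
-- current_state, for each key j of current_state[i]: current_state[i][j] += state[i][j]
def get_aggregated_state (agents_info : List (String × List (String × List (String × Int)))) (current_state : Option (List (String × List (String × Int)))) : List (String × List (String × Int)) :=
  let cs0 := match current_state with
             | none => STATE_DICT_L
             | some d => d
  agents_info.foldl (fun acc p =>
    (acc.map Prod.fst).foldl (fun acc i =>
      ((lookupD acc i []).map Prod.fst).foldl (fun acc j =>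
        updA i (updA j (fun v => v + lookupD (lookupD p.2 i []) j 0)) acc) acc) acc) cs0

-- ===== PORT B =====
-- totals.get((i,j), 0): first-match lookup over pair keys, default 0
def getP (t : List ((String × String) × Int)) (k : String × String) : Int :=
  match t with
  | [] => 0
  | p :: t => if p.1 = k then p.2 else getP t k

-- totals[(i,j)] = totals.get((i,j), 0) + v: update the first match in place, else append
def bump (t : List ((String × String) × Int)) (k : String × String) (v : Int) : List ((String × String) × Int) :=
  match t with
  | [] => [(k, v)]
  | p :: t => if p.1 = k then (p.1, p.2 + v) :: t else p :: bump t k v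

-- literal transliteration of B: pass 1 folds every leaf of every agent's state into the flat
-- totals dict keyed by (i,j); pass 2 rebuilds the base with each leaf's total added in.
def get_aggregated_state_alt (agents_info : List (String × List (String × List (String × Int)))) (current_state : Option (List (String × List (String × Int)))) : List (String × List (String × Int)) :=
  let base := current_state.getD STATE_DICT_L
  let totals := (agents_info.map Prod.snd).foldl (fun t s =>
      s.foldl (fun t p => p.2.foldl (fun t q => bump t (p.1, q.1) q.2) t) t) []
  base.map (fun p =>
    (p.1, p.2.map (fun q => (q.1, q.2 + getP totals (p.1, q.1)))))

-- ===== PRECONDITION & SPEC =====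
-- Pre_ excludes (a) inputs where Python A raises KeyError — some agent's state is missing a
-- key (or sub-key) that the base state dict has — and (b) association lists with duplicate
-- keys at any level, which do not represent any Python dict (dict keys are unique).
def Pre_get_aggregated_state (agents_info : List (String × List (String × List (String × Int)))) (current_state : Option (List (String × List (String × Int)))) : Prop :=
  let base := current_state.getD STATE_DICT_L
  (base.map Prod.fst).Nodup ∧
  (∀ p ∈ base, (p.2.map Prod.fst).Nodup) ∧
  (∀ a ∈ agents_info, (a.2.map Prod.fst).Nodup ∧
    (∀ r ∈ a.2, (r.2.map Prod.fst).Nodup) ∧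
    ∀ p ∈ base, ∃ r ∈ a.2, r.1 = p.1 ∧ ∀ q ∈ p.2, q.1 ∈ r.2.map Prod.fst)
instance (agents_info : List (String × List (String × List (String × Int)))) (current_state : Option (List (String × List (String × Int)))) : Decidable (Pre_get_aggregated_state agents_info current_state) := by unfold Pre_get_aggregated_state; infer_instance

def pvWitness_get_aggregated_state : (List (String × List (String × List (String × Int)))) × (Option (List (String × List (String × Int)))) :=
  ([("a1", [("production", [("min", 1), ("max", 2), ("current", 3)]),
            ("consumption", [("min", 0), ("max", 4), ("current", 2)])])], none)

def Spec_get_aggregated_state (agents_info : List (String × List (String × List (String × Int)))) (current_state : Option (List (String × List (String × Int)))) (out : List (String × List (String × Int))) : Prop := out = get_aggregated_state_alt agents_info current_state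
instance (agents_info : List (String × List (String × List (String × Int)))) (current_state : Option (List (String × List (String × Int)))) (out : List (String × List (String × Int))) : Decidable (Spec_get_aggregated_state agents_info current_state out) := by unfold Spec_get_aggregated_state; infer_instance

-- ===== CLAIM (what is proved, stated in full; the proofs are below) =====
def Claim_equal_get_aggregated_state : Prop := ∀ (agents_info : List (String × List (String × List (String × Int)))) (current_state : Option (List (String × List (String × Int)))), Dom_get_aggregated_state agents_info current_state → Pre_get_aggregated_state agents_info current_state → Spec_get_aggregated_state agents_info current_state (get_aggregated_state agents_info current_state)

-- ===== LEMMAS AND PROOFS =====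

-- ---- A-side: the triple nested mutating loop is a pointwise map, and folding those maps
-- ---- over the agents yields, at each leaf, the base value plus the sum of lookups.

theorem updA_id {α : Type} (k : String) (d : List (String × α)) :
    updA k (fun v => v) d = d := by
  induction d with
  | nil => rfl
  | cons p t ih =>
      obtain ⟨k', v⟩ := p
      by_cases h : k' = k <;> simp [updA, h, ih]

theorem updA_comp {α : Type} (k : String) (F G : α → α) (d : List (String × α)) :
    updA k F (updA k G d) = updA k (fun v => F (G v)) d := by
  induction d with
  | nil => rfl
  | cons p t ih => by_cases h : p.1 = k <;> simp [updA, h, ih]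

theorem foldl_updA_commute {α : Type} (i : String) (g : String → α → α) :
    ∀ (js : List String) (acc : List (String × α)),
      js.foldl (fun acc j => updA i (g j) acc) acc
        = updA i (fun inner => js.foldl (fun inner j => g j inner) inner) acc := by
  intro js
  induction js with
  | nil => intro acc; exact (updA_id i acc).symm
  | cons j js ih =>
      intro acc
      simp only [List.foldl_cons]
      rw [ih, updA_comp]

theorem updA_congr_lookup {α : Type} (i : String) (F G : α → α) (dflt : α)
    (d : List (String × α)) (h : F (lookupD d i dflt) = G (lookupD d i dflt)) :
    updA i F d = updA i G d := by
  induction d with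
  | nil => rfl
  | cons p t ih =>
      by_cases hp : p.1 = i
      · simp only [updA, hp, if_pos]
        simp [lookupD, hp] at h
        simp [h]
      · simp only [updA, if_neg hp]
        refine congrArg _ (ih ?_)
        simpa [lookupD, hp] using h

theorem map_if_not_mem {α : Type} (j : String) (G : α → α) (t : List (String × α))
    (h : j ∉ t.map Prod.fst) :
    t.map (fun p => if p.1 = j then (p.1, G p.2) else p) = t := by
  induction t with
  | nil => rfl
  | cons p t ih =>
      simp only [List.map_cons, List.mem_cons] at h
      have h1 : p.1 ≠ j := fun e => h (by simp [e])
      have h2 : j ∉ t.map Prod.fst := fun e => h (by simp [e])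
      simp [h1, ih h2]

theorem updA_eq_map {α : Type} (j : String) (G : α → α) (d : List (String × α))
    (hd : (d.map Prod.fst).Nodup) :
    updA j G d = d.map (fun p => if p.1 = j then (p.1, G p.2) else p) := by
  induction d with
  | nil => rfl
  | cons p t ih =>
      simp only [List.map_cons, List.nodup_cons] at hd
      by_cases h : p.1 = j
      · subst h
        simp [updA, map_if_not_mem p.1 G t hd.1]
      · simp [updA, h, ih hd.2]

theorem foldl_updA_keys {α : Type} (F : String → α → α) :
    ∀ (L : List String) (d : List (String × α)), L.Nodup → (d.map Prod.fst).Nodup →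
      L.foldl (fun d j => updA j (F j) d) d
        = d.map (fun p => if p.1 ∈ L then (p.1, F p.1 p.2) else p) := by
  intro L
  induction L with
  | nil => intro d _ _; simp
  | cons j L ih =>
      intro d hL hd
      simp only [List.nodup_cons] at hL
      simp only [List.foldl_cons]
      rw [updA_eq_map j (F j) d hd]
      have hd' : ((d.map (fun p => if p.1 = j then (p.1, F j p.2) else p)).map Prod.fst).Nodup := by
        have : (d.map (fun p => if p.1 = j then (p.1, F j p.2) else p)).map Prod.fst
            = d.map Prod.fst := by
          rw [List.map_map]
          refine List.map_congr_left ?_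
          intro p _
          by_cases h : p.1 = j <;> simp [h]
        rw [this]; exact hd
      rw [ih _ hL.2 hd', List.map_map]
      refine List.map_congr_left ?_
      intro p _
      by_cases h1 : p.1 = j
      · simp [h1, hL.1]
      · by_cases h2 : p.1 ∈ L <;> simp [h1, h2]

theorem agent_step (state : List (String × List (String × Int)))
    (d : List (String × List (String × Int)))
    (hd : (d.map Prod.fst).Nodup) (hin : ∀ p ∈ d, (p.2.map Prod.fst).Nodup) :
    (d.map Prod.fst).foldl (fun acc i =>
        ((lookupD acc i []).map Prod.fst).foldl (fun acc j =>
          updA i (updA j (fun v => v + lookupD (lookupD state i []) j 0)) acc) acc) d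
      = d.map (fun p => (p.1, p.2.map (fun q =>
          (q.1, q.2 + lookupD (lookupD state p.1 []) q.1 0)))) := by
  have hbody : ∀ (acc : List (String × List (String × Int))) (i : String),
      ((lookupD acc i []).map Prod.fst).foldl (fun acc j =>
          updA i (updA j (fun v => v + lookupD (lookupD state i []) j 0)) acc) acc
        = updA i (fun inner => (inner.map Prod.fst).foldl (fun inner j =>
            updA j (fun v => v + lookupD (lookupD state i []) j 0) inner) inner) acc := by
    intro acc i
    rw [foldl_updA_commute i (fun j => updA j (fun v => v + lookupD (lookupD state i []) j 0))
        ((lookupD acc i []).map Prod.fst) acc]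
    exact updA_congr_lookup i _ _ [] acc rfl
  calc (d.map Prod.fst).foldl (fun acc i =>
        ((lookupD acc i []).map Prod.fst).foldl (fun acc j =>
          updA i (updA j (fun v => v + lookupD (lookupD state i []) j 0)) acc) acc) d
      = (d.map Prod.fst).foldl (fun acc i =>
          updA i (fun inner => (inner.map Prod.fst).foldl (fun inner j =>
            updA j (fun v => v + lookupD (lookupD state i []) j 0) inner) inner) acc) d := by
        have hfun : (fun (acc : List (String × List (String × Int))) (i : String) =>
            ((lookupD acc i []).map Prod.fst).foldl (fun acc j =>
              updA i (updA j (fun v => v + lookupD (lookupD state i []) j 0)) acc) acc)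
            = fun acc i => updA i (fun inner => (inner.map Prod.fst).foldl (fun inner j =>
                updA j (fun v => v + lookupD (lookupD state i []) j 0) inner) inner) acc :=
          funext fun acc => funext fun i => hbody acc i
        rw [hfun]
    _ = d.map (fun p => if p.1 ∈ d.map Prod.fst then
          (p.1, (p.2.map Prod.fst).foldl (fun inner j =>
            updA j (fun v => v + lookupD (lookupD state p.1 []) j 0) inner) p.2) else p) := by
        exact foldl_updA_keys _ (d.map Prod.fst) d hd hd
    _ = d.map (fun p => (p.1, p.2.map (fun q =>
          (q.1, q.2 + lookupD (lookupD state p.1 []) q.1 0)))) := by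
        refine List.map_congr_left ?_
        intro p hp
        have hmem : p.1 ∈ d.map Prod.fst := List.mem_map_of_mem hp
        rw [if_pos hmem]
        rw [foldl_updA_keys (fun j v => v + lookupD (lookupD state p.1 []) j 0)
            (p.2.map Prod.fst) p.2 (hin p hp) (hin p hp)]
        refine congrArg _ (List.map_congr_left ?_)
        intro q hq
        simp [List.mem_map_of_mem hq]

theorem fold_mapAdd_eq_sum :
    ∀ (states : List (List (String × List (String × Int))))
      (d : List (String × List (String × Int))),
      states.foldl (fun acc s => acc.map (fun p => (p.1, p.2.map (fun q =>
          (q.1, q.2 + lookupD (lookupD s p.1 []) q.1 0))))) d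
        = d.map (fun p => (p.1, p.2.map (fun q =>
            (q.1, q.2 + (states.map (fun s => lookupD (lookupD s p.1 []) q.1 0)).sum)))) := by
  intro states
  induction states with
  | nil =>
      intro d
      simp
  | cons s states ih =>
      intro d
      simp only [List.foldl_cons]
      rw [ih, List.map_map]
      refine List.map_congr_left ?_
      intro p _
      simp only [Function.comp, List.map_map]
      refine congrArg _ (List.map_congr_left ?_)
      intro q _
      simp [add_assoc]

theorem mapAdd_keys (s : List (String × List (String × Int)))
    (d : List (String × List (String × Int))) :
    (d.map (fun p => (p.1, p.2.map (fun q =>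
        (q.1, q.2 + lookupD (lookupD s p.1 []) q.1 0))))).map Prod.fst = d.map Prod.fst := by
  rw [List.map_map]; rfl

theorem A_fold_eq :
    ∀ (ai : List (String × List (String × List (String × Int))))
      (d : List (String × List (String × Int))),
      (d.map Prod.fst).Nodup → (∀ p ∈ d, (p.2.map Prod.fst).Nodup) →
      ai.foldl (fun acc p =>
        (acc.map Prod.fst).foldl (fun acc i =>
          ((lookupD acc i []).map Prod.fst).foldl (fun acc j =>
            updA i (updA j (fun v => v + lookupD (lookupD p.2 i []) j 0)) acc) acc) acc) d
      = (ai.map Prod.snd).foldl (fun acc s => acc.map (fun p => (p.1, p.2.map (fun q =>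
          (q.1, q.2 + lookupD (lookupD s p.1 []) q.1 0))))) d := by
  intro ai
  induction ai with
  | nil => intro d _ _; rfl
  | cons a ai ih =>
      intro d hd hin
      simp only [List.foldl_cons, List.map_cons]
      rw [agent_step a.2 d hd hin]
      refine ih _ ?_ ?_
      · rw [mapAdd_keys]; exact hd
      · intro p hp
        simp only [List.mem_map] at hp
        obtain ⟨r, hr, hrp⟩ := hp
        subst hrp
        simpa [List.map_map, Function.comp] using hin r hr

-- ---- B-side: characterise the flat totals dict: getP totals (i,j) is the sum, over all
-- ---- agents, of that agent's contribution at (i,j).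

theorem getP_bump (t : List ((String × String) × Int)) (k k' : String × String) (v : Int) :
    getP (bump t k v) k' = getP t k' + (if k' = k then v else 0) := by
  induction t with
  | nil => by_cases h : k = k' <;> simp [bump, getP, h, eq_comm]
  | cons p t ih =>
      by_cases hp : p.1 = k
      · subst hp
        by_cases hk : p.1 = k'
        · subst hk; simp [bump, getP]
        · simp [bump, getP, hk, Ne.symm hk]
      · have hb : bump (p :: t) k v = p :: bump t k v := by simp [bump, hp]
        rw [hb]
        by_cases hk : p.1 = k'
        · have hk' : ¬ k' = k := fun hh => hp (hk.trans hh)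
          simp [getP, hk, hk']
        · simp [getP, hk, ih]

-- per-key sum of a flat contribution list
def sumFor (L : List ((String × String) × Int)) (k : String × String) : Int :=
  ((L.filter (fun kv => kv.1 = k)).map (fun kv => kv.2)).sum

theorem getP_foldl_bump :
    ∀ (L : List ((String × String) × Int)) (t : List ((String × String) × Int)) (k : String × String),
      getP (L.foldl (fun t kv => bump t kv.1 kv.2) t) k = getP t k + sumFor L k := by
  intro L
  induction L with
  | nil => intro t k; simp [sumFor]
  | cons kv L ih =>
      intro t k
      simp only [List.foldl_cons]
      rw [ih, getP_bump]
      by_cases h : k = kv.1 <;> simp [sumFor, h, List.filter_cons, eq_comm] <;> ring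

-- one agent's state flattened to ((i,j), v) triples
def flatS (s : List (String × List (String × Int))) : List ((String × String) × Int) :=
  s.flatMap (fun p => p.2.map (fun q => ((p.1, q.1), q.2)))

theorem stateFold_eq_flat :
    ∀ (s : List (String × List (String × Int))) (t : List ((String × String) × Int)),
      s.foldl (fun t p => p.2.foldl (fun t q => bump t (p.1, q.1) q.2) t) t
        = (flatS s).foldl (fun t kv => bump t kv.1 kv.2) t := by
  intro s
  induction s with
  | nil => intro t; rfl
  | cons p s ih =>
      intro t
      have hf : flatS (p :: s) = p.2.map (fun q => ((p.1, q.1), q.2)) ++ flatS s := by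
        simp [flatS]
      rw [List.foldl_cons, hf, List.foldl_append, List.foldl_map, ih]

-- with unique inner keys, the filtered sum over one inner dict is the first-match lookup
theorem sumInner_eq_lookup (j : String) :
    ∀ (inner : List (String × Int)), (inner.map Prod.fst).Nodup →
      ((inner.filter (fun q => q.1 = j)).map (fun q => q.2)).sum = lookupD inner j 0 := by
  intro inner
  induction inner with
  | nil => intro _; simp [lookupD]
  | cons q inner ih =>
      intro hn
      simp only [List.map_cons, List.nodup_cons] at hn
      by_cases h : q.1 = j
      · have hnil : inner.filter (fun q => q.1 = j) = [] := by
          refine List.filter_eq_nil_iff.mpr ?_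
          intro r hr hrj
          have hrj' : r.1 = j := by simpa using hrj
          have hm : r.1 ∈ inner.map Prod.fst := List.mem_map_of_mem hr
          rw [hrj', ← h] at hm
          exact absurd hm hn.1
        simp [List.filter_cons, h, hnil, lookupD]
      · simp [List.filter_cons, h, lookupD, ih hn.2]

theorem sumFor_append (L1 L2 : List ((String × String) × Int)) (k : String × String) :
    sumFor (L1 ++ L2) k = sumFor L1 k + sumFor L2 k := by
  simp [sumFor, List.filter_append]

-- sumFor over one agent's outer entry, flattened
theorem sumFor_map_inner (c i j : String) (inner : List (String × Int)) :
    sumFor (inner.map (fun q => ((c, q.1), q.2))) (i, j)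
      = if c = i then ((inner.filter (fun q => q.1 = j)).map (fun q => q.2)).sum else 0 := by
  unfold sumFor
  rw [List.filter_map, List.map_map]
  by_cases hc : c = i
  · rw [if_pos hc]
    have hfil : inner.filter ((fun kv => decide (kv.1 = (i, j))) ∘ (fun q => ((c, q.1), q.2)))
        = inner.filter (fun q => q.1 = j) := by
      refine List.filter_congr ?_
      intro q _
      simp [Prod.ext_iff, hc]
    rw [hfil]
    rfl
  · rw [if_neg hc]
    have hfil : inner.filter ((fun kv => decide (kv.1 = (i, j))) ∘ (fun q => ((c, q.1), q.2)))
        = [] := by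
      refine List.filter_eq_nil_iff.mpr ?_
      intro q _ hq
      have hq' : c = i ∧ q.1 = j := by simpa [Prod.ext_iff] using hq
      exact hc hq'.1
    rw [hfil]
    simp

theorem flatS_cons (p : String × List (String × Int)) (s : List (String × List (String × Int))) :
    flatS (p :: s) = p.2.map (fun q => ((p.1, q.1), q.2)) ++ flatS s := by
  simp [flatS]

theorem sumFor_flatS_zero (i j : String) :
    ∀ (s : List (String × List (String × Int))), i ∉ s.map Prod.fst →
      sumFor (flatS s) (i, j) = 0 := by
  intro s
  induction s with
  | nil => intro _; simp [sumFor, flatS]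
  | cons p s ih =>
      intro h
      simp only [List.map_cons, List.mem_cons] at h
      push_neg at h
      rw [flatS_cons, sumFor_append, sumFor_map_inner, if_neg (fun hh => h.1 hh.symm),
          ih h.2]
      simp

theorem sumFor_flatS (i j : String) :
    ∀ (s : List (String × List (String × Int))), (s.map Prod.fst).Nodup →
      (∀ r ∈ s, (r.2.map Prod.fst).Nodup) →
      sumFor (flatS s) (i, j) = lookupD (lookupD s i []) j 0 := by
  intro s
  induction s with
  | nil => intro _ _; simp [sumFor, flatS, lookupD]
  | cons p s ih =>
      intro hn hin
      simp only [List.map_cons, List.nodup_cons] at hn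
      rw [flatS_cons, sumFor_append, sumFor_map_inner]
      by_cases h : p.1 = i
      · have hz : sumFor (flatS s) (i, j) = 0 :=
          sumFor_flatS_zero i j s (fun hm => hn.1 (h ▸ hm))
        rw [if_pos h, hz, sumInner_eq_lookup j p.2 (hin p (by simp))]
        simp [lookupD, h]
      · rw [if_neg h, ih hn.2 (fun r hr => hin r (by simp [hr]))]
        simp [lookupD, h]

-- the whole pass-1 fold: getP totals (i,j) = Σ over agents of the (i,j) lookup
theorem getP_totals (i j : String) :
    ∀ (states : List (List (String × List (String × Int)))) (t : List ((String × String) × Int)),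
      (∀ s ∈ states, (s.map Prod.fst).Nodup ∧ ∀ r ∈ s, (r.2.map Prod.fst).Nodup) →
      getP (states.foldl (fun t s =>
          s.foldl (fun t p => p.2.foldl (fun t q => bump t (p.1, q.1) q.2) t) t) t) (i, j)
        = getP t (i, j) + (states.map (fun s => lookupD (lookupD s i []) j 0)).sum := by
  intro states
  induction states with
  | nil => intro t _; simp
  | cons s states ih =>
      intro t hs
      simp only [List.foldl_cons, List.map_cons, List.sum_cons]
      rw [ih _ (fun s' hs' => hs s' (by simp [hs'])), stateFold_eq_flat, getP_foldl_bump,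
          sumFor_flatS i j s (hs s (by simp)).1 (hs s (by simp)).2]
      ring

-- ===== VERDICT (by name: the statement is the Claim_ definition above) =====
theorem get_aggregated_state_spec : Claim_equal_get_aggregated_state := by
  intro agents_info current_state _ hpre
  obtain ⟨hd, hin, hag⟩ := hpre
  show get_aggregated_state agents_info current_state
      = get_aggregated_state_alt agents_info current_state
  unfold get_aggregated_state get_aggregated_state_alt
  have hmain : ∀ (d : List (String × List (String × Int))),
      (d.map Prod.fst).Nodup → (∀ p ∈ d, (p.2.map Prod.fst).Nodup) →
      agents_info.foldl (fun acc p =>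
        (acc.map Prod.fst).foldl (fun acc i =>
          ((lookupD acc i []).map Prod.fst).foldl (fun acc j =>
            updA i (updA j (fun v => v + lookupD (lookupD p.2 i []) j 0)) acc) acc) acc) d
      = d.map (fun p => (p.1, p.2.map (fun q => (q.1, q.2 +
          getP ((agents_info.map Prod.snd).foldl (fun t s =>
            s.foldl (fun t p => p.2.foldl (fun t q => bump t (p.1, q.1) q.2) t) t) [])
            (p.1, q.1))))) := by
    intro d hd0 hin0
    rw [A_fold_eq agents_info d hd0 hin0, fold_mapAdd_eq_sum]
    refine List.map_congr_left ?_
    intro p _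
    refine congrArg _ (List.map_congr_left ?_)
    intro q _
    have := getP_totals p.1 q.1 (agents_info.map Prod.snd) []
      (by intro s hs
          simp only [List.mem_map] at hs
          obtain ⟨a, ha, rfl⟩ := hs
          exact ⟨(hag a ha).1, (hag a ha).2.1⟩)
    simp only [getP] at this
    rw [this, List.map_map]
    simp [Function.comp]
  cases current_state with
  | none => simpa using hmain STATE_DICT_L hd hin
  | some d => simpa using hmain d hd hin
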